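-- pv_equiv track=rewrite | github.com/Thernn88/SAPPHYRE | phymmr/flexcull.py | get_start_end
-- ===== SOURCE A (Python) =====
-- def get_start_end(sequence: str) -> tuple:
--     """
--     Returns the start and end of the sequence
--     """
--     start = 0
--     end = len(sequence)
--     for i, char in enumerate(sequence):
--         if char != "-":
--             start = i
--             break
--     for i, char in enumerate(sequence[::-1]):
--         if char != "-":
--             end = len(sequence) - i
--             break
--     return start, end
-- ===== SOURCE B (Python) =====
-- def get_start_end(sequence: str) -> tuple:
--     """
--     Returns the start and end of the sequence
--     """
--     start = 0
--     end = len(sequence)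
--     seen = False
--     for i, char in enumerate(sequence):
--         if char != "-":
--             if not seen:
--                 start = i
--                 seen = True
--             end = i + 1
--     return start, end
-- ===== Notes on version B (the rewrite author's own statement) =====
-- stated objective: alternative
-- what changed: B replaces A's two scans (a forward scan for the start and a scan over the reversed string for the end) with a single forward pass that maintains both boundaries at once, never materializing the reversed string.
import Mathlib
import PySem

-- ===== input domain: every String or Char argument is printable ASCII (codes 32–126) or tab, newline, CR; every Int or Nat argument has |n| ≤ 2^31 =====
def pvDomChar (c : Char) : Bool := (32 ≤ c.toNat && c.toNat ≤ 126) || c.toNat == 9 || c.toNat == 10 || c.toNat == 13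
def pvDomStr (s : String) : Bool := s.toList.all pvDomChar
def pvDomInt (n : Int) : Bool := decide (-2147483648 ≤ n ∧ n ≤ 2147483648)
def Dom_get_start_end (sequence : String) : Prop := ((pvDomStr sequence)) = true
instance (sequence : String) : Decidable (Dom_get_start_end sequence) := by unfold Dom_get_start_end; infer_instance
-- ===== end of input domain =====

-- B replaces A's two scans (forward for start, over the reversed string for end) with a
-- single forward pass maintaining both boundaries; same O(n) cost, no reversed copy.

-- ===== PORT A =====
-- first loop: for i, char in enumerate(sequence): if char != "-": start = i; break
def pvA_start : List Char → Int → Int → Int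
  | [], _, st => st
  | c :: t, i, st => if c ≠ '-' then i else pvA_start t (i + 1) st

-- second loop: for i, char in enumerate(sequence[::-1]): if char != "-": end = len - i; break
def pvA_end : List Char → Int → Int → Int → Int
  | [], _, _, en => en
  | c :: t, i, n, en => if c ≠ '-' then n - i else pvA_end t (i + 1) n en

def get_start_end (sequence : String) : Int × Int :=
  let l := sequence.toList
  let start : Int := 0
  let endv : Int := l.length
  let start := pvA_start l 0 start
  let endv := pvA_end l.reverse 0 (l.length) endv
  (start, endv)

-- ===== PORT B =====
-- single forward pass: state (start, end, seen)
def pvB_loop : List Char → Int → Int × Int × Bool → Int × Int × Bool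
  | [], _, s => s
  | c :: t, i, (st, en, seen) =>
      if c ≠ '-' then pvB_loop t (i + 1) ((if seen then st else i), i + 1, true)
      else pvB_loop t (i + 1) (st, en, seen)

def get_start_end_alt (sequence : String) : Int × Int :=
  let l := sequence.toList
  let r := pvB_loop l 0 (0, (l.length : Int), false)
  (r.1, r.2.1)

-- ===== PRECONDITION & SPEC =====
def Spec_get_start_end (sequence : String) (out : Int × Int) : Prop := out = get_start_end_alt sequence
instance (sequence : String) (out : Int × Int) : Decidable (Spec_get_start_end sequence out) := by unfold Spec_get_start_end; infer_instance

-- ===== CLAIM (what is proved, stated in full; the proofs are below) =====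
def Claim_equal_get_start_end : Prop := ∀ (sequence : String), Dom_get_start_end sequence → Spec_get_start_end sequence (get_start_end sequence)

-- ===== LEMMAS AND PROOFS =====

-- spec of the "end" accumulator of B: last non-dash position + 1, default en
def pvLastE : List Char → Int → Int → Int
  | [], _, en => en
  | c :: t, i, en => pvLastE t (i + 1) (if c ≠ '-' then i + 1 else en)

theorem pvB_loop_seen (t : List Char) : ∀ (i st en : Int),
    pvB_loop t i (st, en, true) = (st, pvLastE t i en, true) := by
  induction t with
  | nil => intro i st en; simp [pvB_loop, pvLastE]
  | cons c t ih =>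
    intro i st en
    by_cases h : c = '-' <;> simp [pvB_loop, pvLastE, h, ih]

theorem pvB_loop_unseen (t : List Char) : ∀ (i en : Int),
    ((pvB_loop t i (0, en, false)).1 = pvA_start t i 0) ∧
    ((pvB_loop t i (0, en, false)).2.1 = pvLastE t i en) := by
  induction t with
  | nil => intro i en; simp [pvB_loop, pvA_start, pvLastE]
  | cons c t ih =>
    intro i en
    by_cases h : c = '-'
    · simpa [pvB_loop, pvA_start, pvLastE, h] using ih (i + 1) en
    · simp [pvB_loop, pvA_start, pvLastE, h, pvB_loop_seen]

theorem pvLastE_append (l : List Char) (c : Char) : ∀ (i en : Int),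
    pvLastE (l ++ [c]) i en
      = if c ≠ '-' then i + l.length + 1 else pvLastE l i en := by
  induction l with
  | nil => intro i en; by_cases h : c = '-' <;> simp [pvLastE, h]
  | cons d l ih =>
    intro i en
    simp only [List.cons_append, pvLastE]
    rw [ih]
    by_cases h : c = '-'
    · simp [h]
    · simp only [h, ne_eq, not_false_eq_true, if_true, List.length_cons]
      omega

theorem pvA_end_reverse (l : List Char) : ∀ (i n : Int),
    pvA_end l.reverse i n n = pvLastE l (n - i - l.length) n := by
  induction l using List.reverseRecOn with
  | nil => intro i n; simp [pvA_end, pvLastE]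
  | append_singleton l c ih =>
    intro i n
    rw [List.reverse_append]
    simp only [List.reverse_cons, List.reverse_nil, List.nil_append,
      List.singleton_append, pvA_end, pvLastE_append]
    by_cases h : c = '-'
    · have e : n - (i + 1) - (l.length : Int) = n - i - ((l ++ [c]).length : Int) := by
        simp [h]; push_cast; ring
      simp only [h, ne_eq, not_true_eq_false, if_false, ih (i + 1) n, e]
    · simp only [h, ne_eq, not_false_eq_true, if_true, List.length_append,
        List.length_cons, List.length_nil]
      omega

-- ===== VERDICT (by name: the statement is the Claim_ definition above) =====
theorem get_start_end_spec : Claim_equal_get_start_end := by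
  intro s _
  unfold Spec_get_start_end get_start_end get_start_end_alt
  have h1 := pvB_loop_unseen s.toList 0 (s.toList.length : Int)
  have h2 := pvA_end_reverse s.toList 0 (s.toList.length : Int)
  simp only [sub_zero, sub_self] at h2
  exact Prod.ext h1.1.symm (h2.trans h1.2.symm)
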